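-- pv_equiv track=rewrite | github.com/magnetarai-founder/MedStation-MedGemma_Impact | apps/backend/api/workflow_p2p_sync.py | happens_before
-- ===== SOURCE A (Python) =====
-- from typing import Dict, List, Optional, Callable
--
-- def happens_before(clock_a: Dict[str, int], clock_b: Dict[str, int]) -> bool:
--     """Check if event A happened before event B (causality)"""
--     # A < B if: for all peers, A[p] <= B[p] AND exists p where A[p] < B[p]
--     all_peers = set(clock_a.keys()) | set(clock_b.keys())
--
--     less_or_equal = True
--     strictly_less = False
--
--     for peer in all_peers:
--         a_val = clock_a.get(peer, 0)
--         b_val = clock_b.get(peer, 0)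
--
--         if a_val > b_val:
--             less_or_equal = False
--             break
--         elif a_val < b_val:
--             strictly_less = True
--
--     return less_or_equal and strictly_less
-- ===== SOURCE B (Python) =====
-- def happens_before(clock_a, clock_b):
--     """Check if event A happened before event B (causality)"""
--     # Sort both clocks' items by key and merge with two pointers; a missing
--     # key on either side counts as 0.  A < B iff no component of A exceeds
--     # the matching component of B and at least one is strictly smaller.
--     xs = sorted(clock_a.items())
--     ys = sorted(clock_b.items())
--     i = 0
--     j = 0
--     strict = False
--     while i < len(xs) and j < len(ys):
--         ka, va = xs[i]
--         kb, vb = ys[j]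
--         if ka < kb:
--             if va > 0:
--                 return False
--             if va < 0:
--                 strict = True
--             i += 1
--         elif kb < ka:
--             if vb < 0:
--                 return False
--             if vb > 0:
--                 strict = True
--             j += 1
--         else:
--             if va > vb:
--                 return False
--             if va < vb:
--                 strict = True
--             i += 1
--             j += 1
--     while i < len(xs):
--         va = xs[i][1]
--         if va > 0:
--             return False
--         if va < 0:
--             strict = True
--         i += 1
--     while j < len(ys):
--         vb = ys[j][1]
--         if vb < 0:
--             return False
--         if vb > 0:
--             strict = True
--         j += 1
--     return strict
-- ===== Notes on version B (the rewrite author's own statement) =====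
-- stated objective: alternative
-- what changed: Replaces A's hash-set union of keys with per-peer dict lookups by sorting both clocks' item lists and doing a two-pointer ordered merge that never performs a lookup, treating an unmatched key as value 0.
import Mathlib
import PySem

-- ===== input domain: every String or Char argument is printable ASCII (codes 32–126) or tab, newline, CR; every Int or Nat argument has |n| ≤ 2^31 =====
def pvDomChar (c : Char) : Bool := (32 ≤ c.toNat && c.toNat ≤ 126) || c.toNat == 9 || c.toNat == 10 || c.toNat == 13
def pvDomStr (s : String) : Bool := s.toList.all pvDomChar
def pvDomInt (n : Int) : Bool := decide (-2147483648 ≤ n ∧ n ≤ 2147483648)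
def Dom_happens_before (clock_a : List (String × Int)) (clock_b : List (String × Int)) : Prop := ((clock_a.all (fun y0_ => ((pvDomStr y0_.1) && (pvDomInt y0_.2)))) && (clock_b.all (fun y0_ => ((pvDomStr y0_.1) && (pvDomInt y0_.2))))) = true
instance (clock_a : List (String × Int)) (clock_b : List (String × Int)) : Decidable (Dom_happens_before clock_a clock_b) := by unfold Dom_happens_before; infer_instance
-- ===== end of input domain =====

-- B replaces A's hash-set union of keys with per-peer dict lookups by a sort-and-merge:
-- both clocks' item lists are sorted by key and compared by a two-pointer ordered merge
-- with no lookups (an unmatched key counts as 0); objective: alternative algorithm.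

-- ===== PORT A =====
-- the for-loop with its two flags and the break on a_val > b_val
def hbLoopA (clock_a : List (String × Int)) (clock_b : List (String × Int)) :
    List String → Bool × Bool → Bool × Bool
  | [], st => st
  | p :: rest, (le, lt) =>
    let a_val := PySem.Dict.getD (PySem.Dict.mk clock_a) p (0:Int)
    let b_val := PySem.Dict.getD (PySem.Dict.mk clock_b) p (0:Int)
    if a_val > b_val then (false, lt)          -- less_or_equal = False; break
    else if a_val < b_val then hbLoopA clock_a clock_b rest (le, true)
    else hbLoopA clock_a clock_b rest (le, lt)

def happens_before (clock_a : List (String × Int)) (clock_b : List (String × Int)) : Bool :=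
  let all_peers := PySem.Set.union (PySem.Set.ofList (PySem.Dict.keys (PySem.Dict.mk clock_a)))
                                   (PySem.Set.ofList (PySem.Dict.keys (PySem.Dict.mk clock_b)))
  let st := hbLoopA clock_a clock_b all_peers (true, false)
  st.1 && st.2

-- ===== PORT B =====
-- the drain loop 'while i < len(xs)' (only A-side items left)
def hbTailX : List (String × Int) → Bool → Bool
  | [], strict => strict
  | (_, va) :: xs, strict =>
    if va > 0 then false else hbTailX xs (strict || decide (va < 0))

-- the drain loop 'while j < len(ys)' (only B-side items left)
def hbTailY : List (String × Int) → Bool → Bool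
  | [], strict => strict
  | (_, vb) :: ys, strict =>
    if vb < 0 then false else hbTailY ys (strict || decide (vb > 0))

-- the main two-pointer loop 'while i < len(xs) and j < len(ys)', then the two drains
def hbMerge : List (String × Int) → List (String × Int) → Bool → Bool
  | [], ys, strict => hbTailY ys strict
  | xs@(_ :: _), [], strict => hbTailX xs strict
  | (ka, va) :: xs, (kb, vb) :: ys, strict =>
    if ka < kb then
      if va > 0 then false else hbMerge xs ((kb, vb) :: ys) (strict || decide (va < 0))
    else if kb < ka then
      if vb < 0 then false else hbMerge ((ka, va) :: xs) ys (strict || decide (vb > 0))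
    else
      if va > vb then false else hbMerge xs ys (strict || decide (va < vb))
termination_by xs ys _ => xs.length + ys.length

-- sorted(clock_a.items()): tuple sort; under Pre_ the keys are distinct, so Python's
-- tuple comparison is decided by the key alone and sorting by key is exact
def happens_before_alt (clock_a : List (String × Int)) (clock_b : List (String × Int)) : Bool :=
  hbMerge (PySem.List.sorted clock_a (fun kv => kv.1))
          (PySem.List.sorted clock_b (fun kv => kv.1)) false

-- ===== PRECONDITION & SPEC =====
-- Pre_: the association lists encode Python dicts, whose keys are always distinct;
-- it excludes no Python input of A (a dict cannot carry duplicate keys).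
def Pre_happens_before (clock_a : List (String × Int)) (clock_b : List (String × Int)) : Prop :=
  (clock_a.map Prod.fst).Nodup ∧ (clock_b.map Prod.fst).Nodup
instance (clock_a : List (String × Int)) (clock_b : List (String × Int)) : Decidable (Pre_happens_before clock_a clock_b) := by unfold Pre_happens_before; infer_instance

def pvWitness_happens_before : (List (String × Int)) × (List (String × Int)) :=
  ([("a", 1), ("b", 2)], [("a", 1), ("b", 3)])

def Spec_happens_before (clock_a : List (String × Int)) (clock_b : List (String × Int)) (out : Bool) : Prop := out = happens_before_alt clock_a clock_b
instance (clock_a : List (String × Int)) (clock_b : List (String × Int)) (out : Bool) : Decidable (Spec_happens_before clock_a clock_b out) := by unfold Spec_happens_before; infer_instance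

-- ===== CLAIM (what is proved, stated in full; the proofs are below) =====
def Claim_equal_happens_before : Prop := ∀ (clock_a : List (String × Int)) (clock_b : List (String × Int)), Dom_happens_before clock_a clock_b → Pre_happens_before clock_a clock_b → Spec_happens_before clock_a clock_b (happens_before clock_a clock_b)

-- ===== LEMMAS AND PROOFS =====

-- first-match lookup with default 0, the common semantic core of both programs
def pvLk : List (String × Int) → String → Int
  | [], _ => 0
  | (k, v) :: t, p => if k = p then v else pvLk t p

theorem pvLk_eq_getD (l : List (String × Int)) (p : String) :
    PySem.Dict.getD (PySem.Dict.mk l) p 0 = pvLk l p := by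
  induction l with
  | nil => rfl
  | cons x t ih =>
    obtain ⟨k, v⟩ := x
    rw [PySem.Dict.getD_eq_get?_getD, PySem.Dict.get?_mk_cons]
    by_cases h : k = p
    · simp [pvLk, h]
    · simp only [pvLk, if_neg h, beq_iff_eq, if_neg h, ← PySem.Dict.getD_eq_get?_getD, ih]

theorem pvLk_of_not_mem (l : List (String × Int)) (p : String) (h : p ∉ l.map Prod.fst) :
    pvLk l p = 0 := by
  induction l with
  | nil => rfl
  | cons x t ih =>
    obtain ⟨k, v⟩ := x
    simp only [List.map_cons, List.mem_cons, not_or] at h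
    simp [pvLk, fun hk : k = p => h.1 hk.symm, ih h.2]
    intro hk; exact absurd hk.symm h.1

theorem pvLk_mem_or_zero (l : List (String × Int)) (p : String) :
    pvLk l p = 0 ∨ (p, pvLk l p) ∈ l := by
  induction l with
  | nil => exact Or.inl rfl
  | cons x t ih =>
    obtain ⟨k, v⟩ := x
    by_cases h : k = p
    · subst h; right; simp [pvLk]
    · rcases ih with h0 | hm
      · left; simpa [pvLk, h] using h0
      · right; simp only [pvLk, if_neg h]; exact List.mem_cons_of_mem _ hm

theorem pvLk_of_mem (l : List (String × Int)) (k : String) (v : Int)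
    (hnd : (l.map Prod.fst).Nodup) (hm : (k, v) ∈ l) : pvLk l k = v := by
  induction l with
  | nil => cases hm
  | cons x t ih =>
    obtain ⟨k', v'⟩ := x
    simp only [List.map_cons, List.nodup_cons] at hnd
    rcases List.mem_cons.mp hm with h | h
    · obtain ⟨h1, h2⟩ := Prod.mk.injEq .. ▸ h
      simp [pvLk, h1.symm, h2]
    · have hne : k' ≠ k := by
        intro he; exact hnd.1 (he ▸ (List.mem_map.mpr ⟨(k, v), h, rfl⟩))
      simp [pvLk, hne, ih hnd.2 h]

theorem pvLk_perm (p : String) {l l' : List (String × Int)} (h : l.Perm l')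
    (hnd : (l.map Prod.fst).Nodup) : pvLk l p = pvLk l' p := by
  induction h with
  | nil => rfl
  | cons x h ih =>
    obtain ⟨k, v⟩ := x
    simp only [List.map_cons, List.nodup_cons] at hnd
    simp only [pvLk]
    by_cases hk : k = p
    · simp [hk]
    · simp [hk, ih hnd.2]
  | swap x y l =>
    obtain ⟨kx, vx⟩ := x
    obtain ⟨ky, vy⟩ := y
    simp only [List.map_cons, List.nodup_cons, List.mem_cons, not_or] at hnd
    have hne : ky ≠ kx := hnd.1.1
    simp only [pvLk]
    by_cases h1 : ky = p <;> by_cases h2 : kx = p <;> simp_all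
  | trans h1 h2 ih1 ih2 =>
    rw [ih1 hnd, ih2 ((h1.map Prod.fst).nodup_iff.mp hnd)]

-- ---- A-side characterisation ----

theorem hbLoopA_all_any (clock_a : List (String × Int)) (clock_b : List (String × Int)) :
    ∀ (peers : List String) (lt0 : Bool),
      ((hbLoopA clock_a clock_b peers (true, lt0)).1 && (hbLoopA clock_a clock_b peers (true, lt0)).2)
        = (peers.all (fun p => pvLk clock_a p ≤ pvLk clock_b p)
           && (lt0 || peers.any (fun p => pvLk clock_a p < pvLk clock_b p)))
  | [], lt0 => by simp [hbLoopA]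
  | p :: rest, lt0 => by
    simp only [hbLoopA, List.all_cons, List.any_cons, pvLk_eq_getD]
    by_cases hgt : pvLk clock_a p > pvLk clock_b p
    · simp [hgt, not_le.mpr hgt]
    · by_cases hlt : pvLk clock_a p < pvLk clock_b p
      · simp only [if_neg hgt, if_pos hlt]
        rw [hbLoopA_all_any clock_a clock_b rest true]
        simp [le_of_lt hlt, hlt]
      · simp only [if_neg hgt, if_neg hlt]
        rw [hbLoopA_all_any clock_a clock_b rest lt0]
        simp [not_lt.mp hgt, hlt]

theorem happens_before_iff (ca cb : List (String × Int)) :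
    happens_before ca cb = true ↔
      (∀ p, pvLk ca p ≤ pvLk cb p) ∧ (∃ p, pvLk ca p < pvLk cb p) := by
  unfold happens_before
  rw [hbLoopA_all_any ca cb _ false]
  simp only [Bool.false_or, Bool.and_eq_true, List.all_eq_true, List.any_eq_true,
    decide_eq_true_iff]
  have hmem : ∀ p : String,
      p ∈ PySem.Set.union (PySem.Set.ofList (PySem.Dict.keys (PySem.Dict.mk ca)))
            (PySem.Set.ofList (PySem.Dict.keys (PySem.Dict.mk cb))) ↔
      p ∈ ca.map Prod.fst ∨ p ∈ cb.map Prod.fst := by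
    intro p
    rw [PySem.Set.mem_union]
    simp [PySem.Set.mem_ofList, PySem.Dict.keys_mk]
  constructor
  · rintro ⟨hall, q, hq, hlt⟩
    refine ⟨fun p => ?_, ⟨q, hlt⟩⟩
    by_cases hp : p ∈ ca.map Prod.fst ∨ p ∈ cb.map Prod.fst
    · exact hall p ((hmem p).mpr hp)
    · push_neg at hp
      rw [pvLk_of_not_mem ca p hp.1, pvLk_of_not_mem cb p hp.2]
  · rintro ⟨hall, q, hlt⟩
    refine ⟨fun p _ => hall p, q, (hmem q).mpr ?_, hlt⟩
    by_contra hq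
    push_neg at hq
    rw [pvLk_of_not_mem ca q hq.1, pvLk_of_not_mem cb q hq.2] at hlt
    exact absurd hlt (lt_irrefl 0)

-- ---- B-side characterisation ----

theorem hbTailX_iff (xs : List (String × Int)) (strict : Bool) :
    hbTailX xs strict = true ↔
      (∀ q ∈ xs, q.2 ≤ 0) ∧ (strict = true ∨ ∃ q ∈ xs, q.2 < 0) := by
  induction xs generalizing strict with
  | nil => simp [hbTailX]
  | cons x t ih =>
    obtain ⟨k, v⟩ := x
    by_cases hv : v > 0
    · simp only [hbTailX, if_pos hv]
      constructor
      · intro h; cases h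
      · rintro ⟨hall, -⟩
        exact absurd (hall (k, v) (List.mem_cons_self ..)) (by simpa using hv)
    · simp only [hbTailX, if_neg hv, ih]
      push_neg at hv
      constructor
      · rintro ⟨hall, hstr⟩
        refine ⟨by simpa [hv] using hall, ?_⟩
        rcases hstr with hs | ⟨q, hq, hql⟩
        · rcases Bool.or_eq_true .. ▸ hs with h | h
          · exact Or.inl h
          · exact Or.inr ⟨(k, v), List.mem_cons_self .., by simpa using h⟩
        · exact Or.inr ⟨q, List.mem_cons_of_mem _ hq, hql⟩
      · rintro ⟨hall, hstr⟩
        refine ⟨fun q hq => hall q (List.mem_cons_of_mem _ hq), ?_⟩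
        rcases hstr with hs | ⟨q, hq, hql⟩
        · exact Or.inl (by simp [hs])
        · rcases List.mem_cons.mp hq with rfl | hq
          · exact Or.inl (by simpa using Or.inr hql)
          · exact Or.inr ⟨q, hq, hql⟩

theorem hbTailY_iff (ys : List (String × Int)) (strict : Bool) :
    hbTailY ys strict = true ↔
      (∀ q ∈ ys, 0 ≤ q.2) ∧ (strict = true ∨ ∃ q ∈ ys, 0 < q.2) := by
  induction ys generalizing strict with
  | nil => simp [hbTailY]
  | cons x t ih =>
    obtain ⟨k, v⟩ := x
    by_cases hv : v < 0
    · simp only [hbTailY, if_pos hv]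
      constructor
      · intro h; cases h
      · rintro ⟨hall, -⟩
        exact absurd (hall (k, v) (List.mem_cons_self ..)) (by simpa using hv)
    · simp only [hbTailY, if_neg hv, ih]
      push_neg at hv
      constructor
      · rintro ⟨hall, hstr⟩
        refine ⟨by simpa [hv] using hall, ?_⟩
        rcases hstr with hs | ⟨q, hq, hql⟩
        · rcases Bool.or_eq_true .. ▸ hs with h | h
          · exact Or.inl h
          · exact Or.inr ⟨(k, v), List.mem_cons_self .., by simpa using h⟩
        · exact Or.inr ⟨q, List.mem_cons_of_mem _ hq, hql⟩
      · rintro ⟨hall, hstr⟩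
        refine ⟨fun q hq => hall q (List.mem_cons_of_mem _ hq), ?_⟩
        rcases hstr with hs | ⟨q, hq, hql⟩
        · exact Or.inl (by simp [hs])
        · rcases List.mem_cons.mp hq with rfl | hq
          · exact Or.inl (by simpa using Or.inr hql)
          · exact Or.inr ⟨q, hq, hql⟩

-- strictly key-sorted
def SK (l : List (String × Int)) : Prop := l.Pairwise (fun x y => x.1 < y.1)

theorem SK_nodup {l : List (String × Int)} (h : SK l) : (l.map Prod.fst).Nodup :=
  List.pairwise_map.mpr (h.imp fun hlt => ne_of_lt hlt)

theorem lk_head_lt (l : List (String × Int)) (k : String) (h : ∀ q ∈ l, k < q.1) :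
    pvLk l k = 0 := by
  apply pvLk_of_not_mem
  intro hm
  rcases List.mem_map.mp hm with ⟨q, hq, rfl⟩
  exact lt_irrefl _ (h q hq)

theorem lk_cons_self (k : String) (v : Int) (t : List (String × Int)) :
    pvLk ((k, v) :: t) k = v := by simp [pvLk]

theorem lk_cons_ne (k : String) (v : Int) (t : List (String × Int)) (p : String)
    (h : p ≠ k) : pvLk ((k, v) :: t) p = pvLk t p := by
  simp only [pvLk, if_neg (fun h' : k = p => h h'.symm)]

-- the drain lemmas in pvLk form (keys Nodup via SK)
theorem tailX_lk (xs : List (String × Int)) (strict : Bool) (hnd : (xs.map Prod.fst).Nodup) :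
    hbTailX xs strict = true ↔
      (∀ p, pvLk xs p ≤ 0) ∧ (strict = true ∨ ∃ p, pvLk xs p < 0) := by
  rw [hbTailX_iff]
  constructor
  · rintro ⟨hall, hstr⟩
    refine ⟨fun p => ?_, ?_⟩
    · rcases pvLk_mem_or_zero xs p with h0 | hm
      · omega
      · exact hall _ hm
    · rcases hstr with hs | ⟨q, hq, hql⟩
      · exact Or.inl hs
      · exact Or.inr ⟨q.1, by rw [pvLk_of_mem xs q.1 q.2 hnd hq]; exact hql⟩
  · rintro ⟨hall, hstr⟩
    refine ⟨fun q hq => by rw [← pvLk_of_mem xs q.1 q.2 hnd hq]; exact hall q.1, ?_⟩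
    rcases hstr with hs | ⟨p, hp⟩
    · exact Or.inl hs
    · rcases pvLk_mem_or_zero xs p with h0 | hm
      · omega
      · exact Or.inr ⟨(p, pvLk xs p), hm, hp⟩

theorem tailY_lk (ys : List (String × Int)) (strict : Bool) (hnd : (ys.map Prod.fst).Nodup) :
    hbTailY ys strict = true ↔
      (∀ p, 0 ≤ pvLk ys p) ∧ (strict = true ∨ ∃ p, 0 < pvLk ys p) := by
  rw [hbTailY_iff]
  constructor
  · rintro ⟨hall, hstr⟩
    refine ⟨fun p => ?_, ?_⟩
    · rcases pvLk_mem_or_zero ys p with h0 | hm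
      · omega
      · exact hall _ hm
    · rcases hstr with hs | ⟨q, hq, hql⟩
      · exact Or.inl hs
      · exact Or.inr ⟨q.1, by rw [pvLk_of_mem ys q.1 q.2 hnd hq]; exact hql⟩
  · rintro ⟨hall, hstr⟩
    refine ⟨fun q hq => by rw [← pvLk_of_mem ys q.1 q.2 hnd hq]; exact hall q.1, ?_⟩
    rcases hstr with hs | ⟨p, hp⟩
    · exact Or.inl hs
    · rcases pvLk_mem_or_zero ys p with h0 | hm
      · omega
      · exact Or.inr ⟨(p, pvLk ys p), hm, hp⟩

theorem hbMerge_iff :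
    ∀ (xs ys : List (String × Int)) (strict : Bool), SK xs → SK ys →
      (hbMerge xs ys strict = true ↔
        (∀ p, pvLk xs p ≤ pvLk ys p) ∧ (strict = true ∨ ∃ p, pvLk xs p < pvLk ys p))
  | [], ys, strict, _, hy => by
    simp only [hbMerge]
    rw [tailY_lk ys strict (SK_nodup hy)]
    simp [pvLk]
  | x :: xs, [], strict, hx, _ => by
    simp only [hbMerge]
    rw [tailX_lk (x :: xs) strict (SK_nodup hx)]
    simp [pvLk]
  | (ka, va) :: xs, (kb, vb) :: ys, strict, hx, hy => by
    rcases List.pairwise_cons.mp hx with ⟨hx1, hx2⟩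
    rcases List.pairwise_cons.mp hy with ⟨hy1, hy2⟩
    simp only [hbMerge]
    by_cases h1 : ka < kb
    · -- A-only key ka
      have hYka : pvLk ((kb, vb) :: ys) ka = 0 := by
        apply lk_head_lt
        intro q hq
        rcases List.mem_cons.mp hq with rfl | hq
        · exact h1
        · exact lt_trans h1 (hy1 q hq)
      have hxska : pvLk xs ka = 0 := lk_head_lt xs ka hx1
      have hXka : pvLk ((ka, va) :: xs) ka = va := lk_cons_self ..
      rw [if_pos h1]
      by_cases hva : va > 0
      · rw [if_pos hva]
        constructor
        · intro h; cases h
        · rintro ⟨hall, -⟩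
          have := hall ka
          rw [hXka, hYka] at this; omega
      · rw [if_neg hva]
        push_neg at hva
        rw [hbMerge_iff xs ((kb, vb) :: ys) _ hx2 hy]
        constructor
        · rintro ⟨hall, hstr⟩
          refine ⟨fun p => ?_, ?_⟩
          · by_cases hp : p = ka
            · subst hp; rw [hXka, hYka]; omega
            · rw [lk_cons_ne _ _ _ _ hp]; exact hall p
          · rcases hstr with hs | ⟨p, hp⟩
            · rcases Bool.or_eq_true .. ▸ hs with h | h
              · exact Or.inl h
              · exact Or.inr ⟨ka, by rw [hXka, hYka]; simpa using h⟩
            · by_cases hpk : p = ka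
              · subst hpk; rw [hxska, hYka] at hp; omega
              · exact Or.inr ⟨p, by rw [lk_cons_ne _ _ _ _ hpk]; exact hp⟩
        · rintro ⟨hall, hstr⟩
          refine ⟨fun p => ?_, ?_⟩
          · by_cases hp : p = ka
            · subst hp; rw [hxska, hYka]
            · rw [← lk_cons_ne ka va xs p hp]; exact hall p
          · rcases hstr with hs | ⟨p, hp⟩
            · exact Or.inl (by simp [hs])
            · by_cases hpk : p = ka
              · subst hpk; rw [hXka, hYka] at hp
                exact Or.inl (by simp [hp])
              · exact Or.inr ⟨p, by rw [← lk_cons_ne ka va xs p hpk]; exact hp⟩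
    · rw [if_neg h1]
      by_cases h2 : kb < ka
      · -- B-only key kb
        have hXkb : pvLk ((ka, va) :: xs) kb = 0 := by
          apply lk_head_lt
          intro q hq
          rcases List.mem_cons.mp hq with rfl | hq
          · exact h2
          · exact lt_trans h2 (hx1 q hq)
        have hyskb : pvLk ys kb = 0 := lk_head_lt ys kb hy1
        have hYkb : pvLk ((kb, vb) :: ys) kb = vb := lk_cons_self ..
        rw [if_pos h2]
        by_cases hvb : vb < 0
        · rw [if_pos hvb]
          constructor
          · intro h; cases h
          · rintro ⟨hall, -⟩
            have := hall kb
            rw [hXkb, hYkb] at this; omega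
        · rw [if_neg hvb]
          push_neg at hvb
          rw [hbMerge_iff ((ka, va) :: xs) ys _ hx hy2]
          constructor
          · rintro ⟨hall, hstr⟩
            refine ⟨fun p => ?_, ?_⟩
            · by_cases hp : p = kb
              · subst hp; rw [hXkb, hYkb]; omega
              · rw [lk_cons_ne _ _ _ _ hp]; exact hall p
            · rcases hstr with hs | ⟨p, hp⟩
              · rcases Bool.or_eq_true .. ▸ hs with h | h
                · exact Or.inl h
                · exact Or.inr ⟨kb, by rw [hXkb, hYkb]; simpa using h⟩
              · by_cases hpk : p = kb
                · subst hpk; rw [hXkb, hyskb] at hp; omega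
                · exact Or.inr ⟨p, by rw [lk_cons_ne _ _ _ _ hpk]; exact hp⟩
          · rintro ⟨hall, hstr⟩
            refine ⟨fun p => ?_, ?_⟩
            · by_cases hp : p = kb
              · subst hp; rw [hXkb, hyskb]
              · rw [← lk_cons_ne kb vb ys p hp]; exact hall p
            · rcases hstr with hs | ⟨p, hp⟩
              · exact Or.inl (by simp [hs])
              · by_cases hpk : p = kb
                · subst hpk; rw [hXkb, hYkb] at hp
                  exact Or.inl (by simp [hp])
                · exact Or.inr ⟨p, by rw [← lk_cons_ne kb vb ys p hpk]; exact hp⟩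
      · -- common key
        have he : ka = kb := le_antisymm (not_lt.mp h2) (not_lt.mp h1)
        subst he
        have hXka : pvLk ((ka, va) :: xs) ka = va := lk_cons_self ..
        have hYka : pvLk ((ka, vb) :: ys) ka = vb := lk_cons_self ..
        have hxska : pvLk xs ka = 0 := lk_head_lt xs ka hx1
        have hyska : pvLk ys ka = 0 := lk_head_lt ys ka hy1
        rw [if_neg h2]
        by_cases hv : va > vb
        · rw [if_pos hv]
          constructor
          · intro h; cases h
          · rintro ⟨hall, -⟩
            have := hall ka
            rw [hXka, hYka] at this; omega
        · rw [if_neg hv]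
          push_neg at hv
          rw [hbMerge_iff xs ys _ hx2 hy2]
          constructor
          · rintro ⟨hall, hstr⟩
            refine ⟨fun p => ?_, ?_⟩
            · by_cases hp : p = ka
              · subst hp; rw [hXka, hYka]; omega
              · rw [lk_cons_ne _ _ _ _ hp, lk_cons_ne _ _ _ _ hp]; exact hall p
            · rcases hstr with hs | ⟨p, hp⟩
              · rcases Bool.or_eq_true .. ▸ hs with h | h
                · exact Or.inl h
                · exact Or.inr ⟨ka, by rw [hXka, hYka]; simpa using h⟩
              · by_cases hpk : p = ka
                · subst hpk; rw [hxska, hyska] at hp; omega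
                · exact Or.inr ⟨p, by rw [lk_cons_ne _ _ _ _ hpk, lk_cons_ne _ _ _ _ hpk]; exact hp⟩
          · rintro ⟨hall, hstr⟩
            refine ⟨fun p => ?_, ?_⟩
            · by_cases hp : p = ka
              · subst hp; rw [hxska, hyska]
              · rw [← lk_cons_ne ka va xs p hp, ← lk_cons_ne ka vb ys p hp]; exact hall p
            · rcases hstr with hs | ⟨p, hp⟩
              · exact Or.inl (by simp [hs])
              · by_cases hpk : p = ka
                · subst hpk; rw [hXka, hYka] at hp
                  exact Or.inl (by simp [hp])
                · exact Or.inr ⟨p, by rw [← lk_cons_ne ka va xs p hpk, ← lk_cons_ne ka vb ys p hpk]; exact hp⟩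
termination_by xs ys _ _ _ => xs.length + ys.length

theorem SK_sorted (l : List (String × Int)) (hnd : (l.map Prod.fst).Nodup) :
    SK (PySem.List.sorted l (fun kv => kv.1)) := by
  have hperm : (PySem.List.sorted l (fun kv => kv.1)).Perm l :=
    PySem.List.sorted_perm l (fun kv => kv.1) false
  have hnd' : ((PySem.List.sorted l (fun kv => kv.1)).map Prod.fst).Nodup :=
    ((hperm.map Prod.fst).nodup_iff).mpr hnd
  have hle := PySem.List.sorted_pairwise l (fun kv => kv.1)
  have hne : (PySem.List.sorted l (fun kv => kv.1)).Pairwise (fun x y => x.1 ≠ y.1) :=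
    List.pairwise_map.mp hnd'
  exact (hle.and hne).imp fun h => lt_of_le_of_ne h.1 h.2

theorem happens_before_alt_iff (ca cb : List (String × Int))
    (hpre : Pre_happens_before ca cb) :
    happens_before_alt ca cb = true ↔
      (∀ p, pvLk ca p ≤ pvLk cb p) ∧ (∃ p, pvLk ca p < pvLk cb p) := by
  obtain ⟨ha, hb⟩ := hpre
  have hska := SK_sorted ca ha
  have hskb := SK_sorted cb hb
  unfold happens_before_alt
  rw [hbMerge_iff _ _ false hska hskb]
  have hca : ∀ p, pvLk (PySem.List.sorted ca (fun kv => kv.1)) p = pvLk ca p := fun p =>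
    pvLk_perm p (PySem.List.sorted_perm ca (fun kv => kv.1) false) (SK_nodup hska)
  have hcb : ∀ p, pvLk (PySem.List.sorted cb (fun kv => kv.1)) p = pvLk cb p := fun p =>
    pvLk_perm p (PySem.List.sorted_perm cb (fun kv => kv.1) false) (SK_nodup hskb)
  simp only [hca, hcb, Bool.false_eq_true, false_or]

-- ===== VERDICT (by name: the statement is the Claim_ definition above) =====
theorem happens_before_spec : Claim_equal_happens_before := by
  intro ca cb _ hpre
  unfold Spec_happens_before
  rw [Bool.eq_iff_iff, happens_before_iff, happens_before_alt_iff ca cb hpre]
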